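-- pv_equiv track=rewrite | github.com/wtthornton/HomeIQ | domains/automation-core/ha-ai-agent-service/src/services/skill_learning/skill_extractor.py | _extract_trigger_types
-- ===== SOURCE A (Python) =====
-- def _extract_trigger_types(tool_names: set[str]) -> list[str]:
--     """Map tool names to automation trigger types."""
--     triggers = []
--     if "create_automation_from_prompt" in tool_names:
--         triggers.append("automation_creation")
--     if any("control" in t for t in tool_names):
--         triggers.append("device_control")
--     if any("scene" in t for t in tool_names):
--         triggers.append("scene_activation")
--     return triggers or ["general"]
-- ===== SOURCE B (Python) =====
-- _ORDER = ["automation_creation", "device_control", "scene_activation"]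
--
--
-- def _labels_for(t):
--     """Trigger labels a single tool name contributes."""
--     labels = set()
--     if t == "create_automation_from_prompt":
--         labels.add("automation_creation")
--     if "control" in t:
--         labels.add("device_control")
--     if "scene" in t:
--         labels.add("scene_activation")
--     return labels
--
--
-- def _extract_trigger_types(tool_names: set[str]) -> list[str]:
--     """Map tool names to automation trigger types.
--
--     Classifies each name independently into trigger labels, unions the
--     contributions, then emits the found labels in canonical order.
--     """
--     found = set()
--     for t in tool_names:
--         found |= _labels_for(t)
--     triggers = [lbl for lbl in _ORDER if lbl in found]
--     return triggers or ["general"]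
-- ===== Notes on version B (the rewrite author's own statement) =====
-- stated objective: alternative
-- what changed: B is rule-driven: a per-name classifier maps each tool name to the set of trigger labels it contributes, the contributions are unioned over the input, and the output is the canonical label order filtered by membership in that union, instead of A's three whole-collection tests appending to a list.
import Mathlib
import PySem

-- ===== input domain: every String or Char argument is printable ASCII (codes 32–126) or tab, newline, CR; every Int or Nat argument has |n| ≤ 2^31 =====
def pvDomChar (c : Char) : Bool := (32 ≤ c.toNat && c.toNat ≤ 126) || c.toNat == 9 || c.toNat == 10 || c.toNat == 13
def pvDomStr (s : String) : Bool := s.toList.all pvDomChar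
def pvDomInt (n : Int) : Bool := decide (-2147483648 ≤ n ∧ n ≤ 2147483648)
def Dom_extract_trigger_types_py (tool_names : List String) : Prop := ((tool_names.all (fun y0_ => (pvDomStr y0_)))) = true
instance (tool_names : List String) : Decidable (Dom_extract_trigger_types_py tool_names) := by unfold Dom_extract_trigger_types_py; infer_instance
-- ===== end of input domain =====

-- B is rule-driven (per-name classifier, union of contributions, canonical-order filter); same return value as A.
-- ===== PORT A =====
def extract_trigger_types_py (tool_names : List String) : List String :=
  let triggers : List String := []
  let triggers := if PySem.Set.contains tool_names "create_automation_from_prompt" then triggers ++ ["automation_creation"] else triggers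
  let triggers := if tool_names.any (fun t => PySem.Str.isIn "control" t) then triggers ++ ["device_control"] else triggers
  let triggers := if tool_names.any (fun t => PySem.Str.isIn "scene" t) then triggers ++ ["scene_activation"] else triggers
  if triggers = [] then ["general"] else triggers

-- ===== PORT B =====
def pvOrder : List String := ["automation_creation", "device_control", "scene_activation"]

def pvLabelsFor (t : String) : PySem.Set String :=
  let labels : PySem.Set String := PySem.Set.empty
  let labels := if t == "create_automation_from_prompt" then PySem.Set.add labels "automation_creation" else labels
  let labels := if PySem.Str.isIn "control" t then PySem.Set.add labels "device_control" else labels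
  let labels := if PySem.Str.isIn "scene" t then PySem.Set.add labels "scene_activation" else labels
  labels

def extract_trigger_types_py_alt (tool_names : List String) : List String :=
  let found := tool_names.foldl (fun s t => PySem.Set.union s (pvLabelsFor t)) PySem.Set.empty
  let triggers := pvOrder.filter (fun lbl => PySem.Set.contains found lbl)
  if triggers = [] then ["general"] else triggers

-- ===== PRECONDITION & SPEC =====
def Spec_extract_trigger_types_py (tool_names : List String) (out : List String) : Prop := out = extract_trigger_types_py_alt tool_names
instance (tool_names : List String) (out : List String) : Decidable (Spec_extract_trigger_types_py tool_names out) := by unfold Spec_extract_trigger_types_py; infer_instance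

-- ===== CLAIM (what is proved, stated in full; the proofs are below) =====
def Claim_equal_extract_trigger_types_py : Prop := ∀ (tool_names : List String), Dom_extract_trigger_types_py tool_names → Spec_extract_trigger_types_py tool_names (extract_trigger_types_py tool_names)

-- ===== LEMMAS AND PROOFS =====

lemma pv_mem_found (x : String) (ts : List String) (s : PySem.Set String) :
    x ∈ ts.foldl (fun s t => PySem.Set.union s (pvLabelsFor t)) s ↔
      x ∈ s ∨ ∃ t ∈ ts, x ∈ pvLabelsFor t := by
  induction ts generalizing s with
  | nil => simp
  | cons a ts ih =>
    simp only [List.foldl_cons, ih, PySem.Set.mem_union, List.mem_cons]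
    constructor
    · rintro (⟨h | h⟩ | ⟨t, ht, hx⟩)
      · exact Or.inl h
      · exact Or.inr ⟨a, Or.inl rfl, h⟩
      · exact Or.inr ⟨t, Or.inr ht, hx⟩
    · rintro (h | ⟨t, (rfl | ht), hx⟩)
      · exact Or.inl (Or.inl h)
      · exact Or.inl (Or.inr hx)
      · exact Or.inr ⟨t, ht, hx⟩

lemma pv_labels_auto (t : String) :
    ("automation_creation" ∈ pvLabelsFor t) ↔ t = "create_automation_from_prompt" := by
  unfold pvLabelsFor
  split_ifs <;> simp_all [PySem.Set.empty]

lemma pv_labels_control (t : String) :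
    ("device_control" ∈ pvLabelsFor t) ↔ PySem.Str.isIn "control" t = true := by
  unfold pvLabelsFor
  split_ifs <;> simp_all [PySem.Set.empty]

lemma pv_labels_scene (t : String) :
    ("scene_activation" ∈ pvLabelsFor t) ↔ PySem.Str.isIn "scene" t = true := by
  unfold pvLabelsFor
  split_ifs <;> simp_all [PySem.Set.empty]

lemma pv_decide_ex_false {f : String → Bool} {ts : List String} (h : ∀ x ∈ ts, f x = false) :
    decide (∃ x ∈ ts, f x = true) = false := by
  simp only [decide_eq_false_iff_not, not_exists, not_and, Bool.not_eq_true]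
  exact h

-- ===== VERDICT (by name: the statement is the Claim_ definition above) =====
theorem extract_trigger_types_py_spec : Claim_equal_extract_trigger_types_py := by
  intro tool_names _
  unfold Spec_extract_trigger_types_py extract_trigger_types_py extract_trigger_types_py_alt pvOrder
  by_cases p1 : "create_automation_from_prompt" ∈ tool_names <;>
  by_cases p2 : ∃ t ∈ tool_names, PySem.Str.isIn "control" t = true <;>
  by_cases p3 : ∃ t ∈ tool_names, PySem.Str.isIn "scene" t = true <;>
  simp_all [List.filter, pv_mem_found, pv_labels_auto, pv_labels_control, pv_labels_scene,
    PySem.Set.empty] <;>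
  (try (split_ifs with h <;> simp_all [pv_decide_ex_false]))
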